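-- pv_equiv track=rewrite | github.com/DemonDamon/AgenticX | agenticx/embodiment/learning/app_knowledge_retriever.py | _find_text_patterns
-- ===== SOURCE A (Python) =====
-- from typing import Dict, List, Optional, Any, Tuple, Set
--
-- def _find_text_patterns(texts: List[str]) -> List[str]:
--     """找到文本模式"""
--     patterns = []
--
--     # 简单的模式检测
--     if all(text.isdigit() for text in texts):
--         patterns.append('numeric')
--     if all('@' in text for text in texts):
--         patterns.append('email')
--     if all(len(text) > 10 for text in texts):
--         patterns.append('long_text')
--
--     return patterns
-- ===== SOURCE B (Python) =====
-- from typing import List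
--
-- def _find_text_patterns(texts: List[str]) -> List[str]:
--     """找到文本模式"""
--     is_numeric = True
--     has_email = True
--     is_long = True
--     for text in texts:
--         if is_numeric and not text.isdigit():
--             is_numeric = False
--         if has_email and '@' not in text:
--             has_email = False
--         if is_long and len(text) <= 10:
--             is_long = False
--     patterns = []
--     if is_numeric:
--         patterns.append('numeric')
--     if has_email:
--         patterns.append('email')
--     if is_long:
--         patterns.append('long_text')
--     return patterns
-- ===== Notes on version B (the rewrite author's own statement) =====
-- stated objective: alternative
-- what changed: Replaces the three separate all() generator scans over the list with one single pass that maintains three boolean flags, appending the matching pattern names afterwards.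
import Mathlib
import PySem

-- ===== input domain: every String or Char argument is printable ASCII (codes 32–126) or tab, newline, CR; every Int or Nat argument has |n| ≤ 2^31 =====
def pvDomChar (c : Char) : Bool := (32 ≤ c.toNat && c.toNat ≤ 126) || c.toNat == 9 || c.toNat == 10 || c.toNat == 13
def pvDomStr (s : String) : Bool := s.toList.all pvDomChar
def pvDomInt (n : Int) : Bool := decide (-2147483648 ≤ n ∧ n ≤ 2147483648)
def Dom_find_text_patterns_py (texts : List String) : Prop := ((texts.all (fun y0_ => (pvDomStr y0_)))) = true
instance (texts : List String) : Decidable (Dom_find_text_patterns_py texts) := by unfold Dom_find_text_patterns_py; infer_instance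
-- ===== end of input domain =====

-- B replaces A's three separate all() scans with one single pass keeping three boolean flags (alternative decomposition, same cost).

-- ===== PORT A =====
def find_text_patterns_py (texts : List String) : List String :=
  let patterns : List String := []
  let patterns := if texts.all (fun text => PySem.Str.strIsdigit text) then patterns ++ ["numeric"] else patterns
  let patterns := if texts.all (fun text => PySem.Str.isIn "@" text) then patterns ++ ["email"] else patterns
  let patterns := if texts.all (fun text => decide (10 < PySem.Str.len text)) then patterns ++ ["long_text"] else patterns
  patterns

-- ===== PORT B =====
def pvStep (f : Bool × Bool × Bool) (text : String) : Bool × Bool × Bool :=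
  let is_numeric := if f.1 && !(PySem.Str.strIsdigit text) then false else f.1
  let has_email := if f.2.1 && !(PySem.Str.isIn "@" text) then false else f.2.1
  let is_long := if f.2.2 && decide (PySem.Str.len text ≤ 10) then false else f.2.2
  (is_numeric, has_email, is_long)

def find_text_patterns_py_alt (texts : List String) : List String :=
  let f := texts.foldl pvStep (true, true, true)
  let patterns : List String := []
  let patterns := if f.1 then patterns ++ ["numeric"] else patterns
  let patterns := if f.2.1 then patterns ++ ["email"] else patterns
  let patterns := if f.2.2 then patterns ++ ["long_text"] else patterns
  patterns

-- ===== PRECONDITION & SPEC =====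
def Spec_find_text_patterns_py (texts : List String) (out : List String) : Prop := out = find_text_patterns_py_alt texts
instance (texts : List String) (out : List String) : Decidable (Spec_find_text_patterns_py texts out) := by unfold Spec_find_text_patterns_py; infer_instance

-- ===== CLAIM (what is proved, stated in full; the proofs are below) =====
def Claim_equal_find_text_patterns_py : Prop := ∀ (texts : List String), Dom_find_text_patterns_py texts → Spec_find_text_patterns_py texts (find_text_patterns_py texts)

-- ===== LEMMAS AND PROOFS =====
-- the fold's three flags are exactly the three all() values, seeded from any initial flags
theorem pvStep_foldl (texts : List String) (a b c : Bool) :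
    texts.foldl pvStep (a, b, c) =
      (a && texts.all (fun t => PySem.Str.strIsdigit t),
       b && texts.all (fun t => PySem.Str.isIn "@" t),
       c && texts.all (fun t => decide (10 < PySem.Str.len t))) := by
  induction texts generalizing a b c with
  | nil => simp
  | cons t ts ih =>
    simp only [List.foldl_cons, List.all_cons, pvStep, ih]
    cases a <;> cases b <;> cases c <;>
      simp [← decide_not]

-- ===== VERDICT (by name: the statement is the Claim_ definition above) =====
theorem find_text_patterns_py_spec : Claim_equal_find_text_patterns_py := by
  intro texts _
  unfold Spec_find_text_patterns_py find_text_patterns_py find_text_patterns_py_alt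
  rw [pvStep_foldl]
  simp
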